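-- pv_equiv track=rewrite | github.com/friendis79/MyGit | Code/name/manim_name.py | merge_name
-- ===== SOURCE A (Python) =====
-- def merge_name(name1, name2):
--     merged = []
--     name1_list, name2_list = list(name1), list(name2)
--     idx, indices1, indices2 = -1, [], []
--     while name1_list and name2_list:
--         merged.append(name1_list.pop(0))
--         indices1.append(idx:=idx+1)
--         merged.append(name2_list.pop(0))
--         indices2.append(idx:=idx+1)
--     if name1_list:
--         for _ in name1_list:
--             indices1.append(idx:=idx+1)
--         merged.extend(name1_list)
--     if name2_list:
--         for _ in name2_list:
--             indices2.append(idx:=idx+1)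
--         merged.extend(name2_list)
--
--     return merged, indices1, indices2
-- ===== SOURCE B (Python) =====
-- def merge_name(name1, name2):
--     l1, l2 = list(name1), list(name2)
--     m = min(len(l1), len(l2))
--     merged = [c for pair in zip(l1, l2) for c in pair]
--     indices1 = list(range(0, 2 * m, 2))
--     indices2 = list(range(1, 2 * m, 2))
--     if len(l1) > m:
--         merged += l1[m:]
--         indices1 += range(2 * m, m + len(l1))
--     elif len(l2) > m:
--         merged += l2[m:]
--         indices2 += range(2 * m, m + len(l2))
--     return merged, indices1, indices2
-- ===== Notes on version B (the rewrite author's own statement) =====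
-- stated objective: faster
-- what changed: A's destructive while-loop popping both lists with list.pop(0) and a single threaded idx counter is replaced by a zip-based interleave plus closed-form range arithmetic (range(0,2m,2) / range(1,2m,2) and one range for the leftover tail) for the index lists.
import Mathlib
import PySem

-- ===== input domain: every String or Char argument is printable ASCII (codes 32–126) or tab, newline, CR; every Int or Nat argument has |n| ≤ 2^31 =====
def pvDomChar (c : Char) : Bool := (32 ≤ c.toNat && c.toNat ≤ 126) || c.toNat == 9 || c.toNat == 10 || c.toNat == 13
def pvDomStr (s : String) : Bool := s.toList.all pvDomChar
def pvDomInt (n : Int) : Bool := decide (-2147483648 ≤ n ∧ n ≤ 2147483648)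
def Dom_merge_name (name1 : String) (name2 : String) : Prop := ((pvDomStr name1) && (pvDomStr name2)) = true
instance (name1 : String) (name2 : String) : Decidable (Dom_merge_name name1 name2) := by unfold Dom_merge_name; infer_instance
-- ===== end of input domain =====

-- B replaces A's pop-driven while loop and threaded idx counter with a zip-based
-- interleave plus closed-form range arithmetic for the index lists (objective: simpler).

-- ===== PORT A =====
-- the `while name1_list and name2_list` loop: pops both heads, appends the two merged
-- chars and one index to each index list, threading idx (incremented twice per round);
-- returns (merged, indices1, indices2, leftover1, leftover2, final idx)
def pvLoopA : List Char → List Char → Int →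
    List String × List Int × List Int × List Char × List Char × Int
  | c1 :: t1, c2 :: t2, idx =>
    let r := pvLoopA t1 t2 (idx + 2)
    (String.ofList [c1] :: String.ofList [c2] :: r.1,
     (idx + 1) :: r.2.1, (idx + 2) :: r.2.2.1, r.2.2.2)
  | l1, l2, idx => ([], [], [], l1, l2, idx)

-- `for _ in leftover: indices.append(idx := idx + 1)`
def pvTailIdx : List Char → Int → List Int
  | [], _ => []
  | _ :: t, idx => (idx + 1) :: pvTailIdx t (idx + 1)

def merge_name (name1 : String) (name2 : String) : List String × List Int × List Int :=
  match pvLoopA name1.toList name2.toList (-1) with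
  | (merged, i1, i2, r1, r2, idx) =>
    -- `if name1_list:` leftover of name1 (extends indices1, idx, merged)
    let s1 := if r1 ≠ [] then
        (merged ++ r1.map (fun c => String.ofList [c]), i1 ++ pvTailIdx r1 idx, idx + r1.length)
      else (merged, i1, idx)
    -- `if name2_list:` leftover of name2 (extends indices2, merged)
    let s2 := if r2 ≠ [] then
        (s1.1 ++ r2.map (fun c => String.ofList [c]), i2 ++ pvTailIdx r2 s1.2.2)
      else (s1.1, i2)
    (s2.1, s1.2.1, s2.2)

-- ===== PORT B =====
def merge_name_alt (name1 : String) (name2 : String) : List String × List Int × List Int :=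
  let l1 := name1.toList
  let l2 := name2.toList
  let m : Nat := min l1.length l2.length
  let merged := (l1.zip l2).flatMap (fun p => [String.ofList [p.1], String.ofList [p.2]])
  let i1 := PySem.List.pyRange 0 (2 * (m : Int)) 2
  let i2 := PySem.List.pyRange 1 (2 * (m : Int)) 2
  if l1.length > m then
    (merged ++ (l1.drop m).map (fun c => String.ofList [c]),
     i1 ++ PySem.List.pyRange (2 * (m : Int)) ((m : Int) + l1.length) 1, i2)
  else if l2.length > m then
    (merged ++ (l2.drop m).map (fun c => String.ofList [c]),
     i1, i2 ++ PySem.List.pyRange (2 * (m : Int)) ((m : Int) + l2.length) 1)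
  else (merged, i1, i2)

-- ===== PRECONDITION & SPEC =====
def Spec_merge_name (name1 : String) (name2 : String) (out : List String × List Int × List Int) : Prop := out = merge_name_alt name1 name2
instance (name1 : String) (name2 : String) (out : List String × List Int × List Int) : Decidable (Spec_merge_name name1 name2 out) := by unfold Spec_merge_name; infer_instance

-- ===== CLAIM (what is proved, stated in full; the proofs are below) =====
def Claim_equal_merge_name : Prop := ∀ (name1 : String) (name2 : String), Dom_merge_name name1 name2 → Spec_merge_name name1 name2 (merge_name name1 name2)

-- ===== LEMMAS AND PROOFS =====

/-- arithmetic progression `[s, s+t, …, s+(n-1)t]`, the common shape of both sides' index lists -/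
def idxSeq (s t : Int) (n : Nat) : List Int := (List.range n).map (fun i : Nat => s + t * (i : Int))

theorem idxSeq_succ (s t : Int) (n : Nat) : idxSeq s t (n + 1) = s :: idxSeq (s + t) t n := by
  simp only [idxSeq, List.range_succ_eq_map, List.map_cons, List.map_map]
  congr 1
  · norm_num
  · exact List.map_congr_left fun i _ => by simp only [Function.comp]; push_cast; ring

theorem pvLoopA_eq (l1 l2 : List Char) (idx : Int) :
    pvLoopA l1 l2 idx =
      ((l1.zip l2).flatMap (fun p => [String.ofList [p.1], String.ofList [p.2]]),
       idxSeq (idx + 1) 2 (min l1.length l2.length),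
       idxSeq (idx + 2) 2 (min l1.length l2.length),
       l1.drop (min l1.length l2.length), l2.drop (min l1.length l2.length),
       idx + 2 * ((min l1.length l2.length : Nat) : Int)) := by
  induction l1 generalizing l2 idx with
  | nil => simp [pvLoopA, idxSeq]
  | cons c1 t1 ih =>
    cases l2 with
    | nil => simp [pvLoopA, idxSeq]
    | cons c2 t2 =>
      have hmin : min (c1 :: t1).length (c2 :: t2).length = min t1.length t2.length + 1 := by
        simp [Nat.succ_min_succ]
      simp only [pvLoopA, ih, List.zip_cons_cons, List.flatMap_cons, hmin, idxSeq_succ,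
        List.drop_succ_cons, Prod.mk.injEq]
      and_intros <;> first | rfl | trivial | (push_cast; ring)

theorem pvTailIdx_eq (l : List Char) (idx : Int) :
    pvTailIdx l idx = idxSeq (idx + 1) 1 l.length := by
  induction l generalizing idx with
  | nil => simp [pvTailIdx, idxSeq]
  | cons c t ih =>
    simp only [pvTailIdx, ih, List.length_cons, idxSeq_succ]

theorem pyRange_even (m : Nat) :
    PySem.List.pyRange 0 (2 * (m : Int)) 2 = idxSeq 0 2 m := by
  rw [PySem.List.pyRange_of_pos _ _ (by norm_num)]
  unfold idxSeq
  rcases Nat.eq_zero_or_pos m with hm | hm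
  · simp [hm]
  · rw [if_pos (by omega)]
    have h : ((2 * (m : Int) - 0 + 2 - 1) / 2).toNat = m := by omega
    rw [h]

theorem pyRange_odd (m : Nat) :
    PySem.List.pyRange 1 (2 * (m : Int)) 2 = idxSeq 1 2 m := by
  rw [PySem.List.pyRange_of_pos _ _ (by norm_num)]
  unfold idxSeq
  rcases Nat.eq_zero_or_pos m with hm | hm
  · simp [hm]
  · rw [if_pos (by omega)]
    have h : ((2 * (m : Int) - 1 + 2 - 1) / 2).toNat = m := by omega
    rw [h]

theorem pyRange_tail (m n : Nat) :
    PySem.List.pyRange (2 * (m : Int)) ((m : Int) + n) 1 = idxSeq (2 * (m : Int)) 1 (n - m) := by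
  rw [PySem.List.pyRange_one]
  unfold idxSeq
  have h : ((m : Int) + n - 2 * m).toNat = n - m := by omega
  rw [h]
  exact List.map_congr_left fun k _ => by push_cast; ring

-- ===== VERDICT (by name: the statement is the Claim_ definition above) =====
theorem merge_name_spec : Claim_equal_merge_name := by
  intro name1 name2 _
  unfold Spec_merge_name merge_name merge_name_alt
  rw [pvLoopA_eq]
  set l1 := name1.toList
  set l2 := name2.toList
  set m := min l1.length l2.length with hm
  have hmle1 : m ≤ l1.length := Nat.min_le_left _ _
  have hmle2 : m ≤ l2.length := Nat.min_le_right _ _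
  have h01 : (-1 : Int) + 1 = 0 := by norm_num
  have h02 : (-1 : Int) + 2 = 1 := by norm_num
  simp only [h01, h02, pyRange_even, pyRange_odd, pyRange_tail]
  by_cases h1 : l1.drop m = []
  · have hl1 : l1.length = m := le_antisymm (by simpa using List.drop_eq_nil_iff.mp h1) hmle1
    by_cases h2 : l2.drop m = []
    · have hl2 : l2.length = m := le_antisymm (by simpa using List.drop_eq_nil_iff.mp h2) hmle2
      simp only [h1, h2, ne_eq, not_true_eq_false, if_neg, ite_false]
      rw [if_neg (by omega), if_neg (by omega)]
    · have hl2 : m < l2.length := by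
        rcases Nat.lt_or_ge m l2.length with h | h
        · exact h
        · exact absurd (List.drop_eq_nil_iff.mpr (by omega)) h2
      simp only [h1, ne_eq, not_true_eq_false, ite_false, h2, not_false_eq_true, ite_true]
      rw [if_neg (by omega), if_pos (by omega)]
      simp only [Prod.mk.injEq]
      refine ⟨rfl, rfl, ?_⟩
      rw [pvTailIdx_eq]
      have harg : -1 + 2 * (m : Int) + 1 = 2 * m := by ring
    -- after the loop idx = -1 + 2m; the tail appends 2m, 2m+1, …
      rw [harg, List.length_drop]
  · have hl1 : m < l1.length := by
      rcases Nat.lt_or_ge m l1.length with h | h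
      · exact h
      · exact absurd (List.drop_eq_nil_iff.mpr (by omega)) h1
    have hl2 : l2.length = m := by omega
    have h2 : l2.drop m = [] := List.drop_eq_nil_iff.mpr (by omega)
    simp only [h1, h2, ne_eq, not_false_eq_true, ite_true, not_true_eq_false, ite_false]
    rw [if_pos (by omega)]
    simp only [Prod.mk.injEq]
    refine ⟨rfl, ?_, rfl⟩
    rw [pvTailIdx_eq]
    have harg : -1 + 2 * (m : Int) + 1 = 2 * m := by ring
    rw [harg, List.length_drop]
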